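-- pv_equiv track=rewrite | github.com/MauriceCalvert/andante | builder/figuration/selector.py | compute_interval
-- ===== SOURCE A (Python) =====
-- def compute_interval(degree_a: int, degree_b: int) -> str:
--     """Compute interval name from two scale degrees.
--
--     Args:
--         degree_a: Starting degree (1-7)
--         degree_b: Ending degree (1-7)
--
--     Returns:
--         Interval name like "step_up", "third_down", etc.
--     """
--     diff = degree_b - degree_a
--
--     # Handle octave wrapping
--     while diff > 7:
--         diff -= 7
--     while diff < -7:
--         diff += 7
--
--     if diff == 0:
--         return "unison"
--     elif diff == 1:
--         return "step_up"
--     elif diff == -1: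
--         return "step_down"
--     elif diff == 2:
--         return "third_up"
--     elif diff == -2:
--         return "third_down"
--     elif diff == 3:
--         return "fourth_up"
--     elif diff == -3:
--         return "fourth_down"
--     elif diff == 4:
--         return "fifth_up"
--     elif diff == -4:
--         return "fifth_down"
--     elif diff == 5:
--         return "sixth_up"
--     elif diff == -5:
--         return "sixth_down"
--     elif diff == 6:
--         return "octave_up"  # 7th scale degree span = octave in diatonic
--     elif diff == -6:
--         return "octave_down"
--     elif diff == 7:
--         return "octave_up"
--     elif diff == -7:
--         return "octave_down"
--     else:
--         assert False, f"Unexpected interval diff: {diff}"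
-- ===== SOURCE B (Python) =====
-- _BASES = ("", "step", "third", "fourth", "fifth", "sixth", "octave", "octave")
--
-- def compute_interval(degree_a: int, degree_b: int) -> str:
--     diff = degree_b - degree_a
--     # closed-form normalization into [-7, 7], equal to the repeated +/- 7 loops
--     if diff > 7:
--         diff = (diff - 1) % 7 + 1
--     elif diff < -7:
--         diff = -((-diff - 1) % 7 + 1)
--     if diff == 0:
--         return "unison"
--     return _BASES[abs(diff)] + ("_up" if diff > 0 else "_down")
-- ===== Notes on version B (the rewrite author's own statement) =====
-- stated objective: simpler
-- what changed: Replaces the two while-loops by a closed-form modular normalization into [-7,7] and the 15-branch if/elif chain by a magnitude/direction decomposition: a base-name table indexed by abs(diff) plus an '_up'/'_down' suffix.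
import Mathlib
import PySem

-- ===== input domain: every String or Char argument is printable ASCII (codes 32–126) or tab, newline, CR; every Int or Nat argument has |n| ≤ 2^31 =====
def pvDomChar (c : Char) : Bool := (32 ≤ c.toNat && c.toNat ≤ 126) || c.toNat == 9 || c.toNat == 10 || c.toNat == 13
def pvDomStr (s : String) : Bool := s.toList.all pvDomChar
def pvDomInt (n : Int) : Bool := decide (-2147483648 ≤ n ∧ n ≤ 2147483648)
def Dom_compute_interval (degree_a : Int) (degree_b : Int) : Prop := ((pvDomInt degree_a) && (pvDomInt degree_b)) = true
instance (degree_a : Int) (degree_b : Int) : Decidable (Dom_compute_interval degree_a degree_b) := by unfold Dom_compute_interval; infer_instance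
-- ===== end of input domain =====

-- B replaces A's two while-loops by a closed-form modular normalization and the
-- 15-branch if/elif chain by a base-name table indexed by |diff| plus an '_up'/'_down'
-- suffix (objective: simpler).


-- ===== PORT A =====
-- `while diff > 7: diff -= 7`
def pvNormUp (d : Int) : Int :=
  if d > 7 then pvNormUp (d - 7) else d
termination_by d.toNat
decreasing_by omega

-- `while diff < -7: diff += 7`
def pvNormDown (d : Int) : Int :=
  if d < -7 then pvNormDown (d + 7) else d
termination_by (-d).toNat
decreasing_by omega

def compute_interval (degree_a : Int) (degree_b : Int) : String :=
  let diff := pvNormDown (pvNormUp (degree_b - degree_a))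
  if diff = 0 then "unison"
  else if diff = 1 then "step_up"
  else if diff = -1 then "step_down"
  else if diff = 2 then "third_up"
  else if diff = -2 then "third_down"
  else if diff = 3 then "fourth_up"
  else if diff = -3 then "fourth_down"
  else if diff = 4 then "fifth_up"
  else if diff = -4 then "fifth_down"
  else if diff = 5 then "sixth_up"
  else if diff = -5 then "sixth_down"
  else if diff = 6 then "octave_up"
  else if diff = -6 then "octave_down"
  else if diff = 7 then "octave_up"
  else if diff = -7 then "octave_down"
  else "unreachable"  -- Python's `assert False` branch; provably never taken

-- ===== PORT B =====
def pvBases : List String :=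
  ["", "step", "third", "fourth", "fifth", "sixth", "octave", "octave"]

def compute_interval_alt (degree_a : Int) (degree_b : Int) : String :=
  let d0 := degree_b - degree_a
  let diff :=
    if d0 > 7 then PySem.Int.mod (d0 - 1) 7 + 1
    else if d0 < -7 then -(PySem.Int.mod (-d0 - 1) 7 + 1)
    else d0
  if diff = 0 then "unison"
  else
    -- `_BASES[abs(diff)]`: index is provably in range, so the IndexError default is never used
    ((PySem.List.pyGet? pvBases |diff|).getD "") ++ (if diff > 0 then "_up" else "_down")

-- ===== PRECONDITION & SPEC =====
def Spec_compute_interval (degree_a : Int) (degree_b : Int) (out : String) : Prop := out = compute_interval_alt degree_a degree_b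
instance (degree_a : Int) (degree_b : Int) (out : String) : Decidable (Spec_compute_interval degree_a degree_b out) := by unfold Spec_compute_interval; infer_instance

-- ===== CLAIM (what is proved, stated in full; the proofs are below) =====
def Claim_equal_compute_interval : Prop := ∀ (degree_a : Int) (degree_b : Int), Dom_compute_interval degree_a degree_b → Spec_compute_interval degree_a degree_b (compute_interval degree_a degree_b)

-- ===== LEMMAS AND PROOFS =====

theorem pvNormUp_eq (d : Int) : pvNormUp d = if d > 7 then (d - 1) % 7 + 1 else d := by
  induction d using pvNormUp.induct with
  | case1 d h ih =>
    rw [pvNormUp, if_pos h, ih, if_pos h]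
    split_ifs with h2 <;> omega
  | case2 d h =>
    rw [pvNormUp, if_neg h, if_neg h]

theorem pvNormDown_eq (d : Int) : pvNormDown d = if d < -7 then -((-d - 1) % 7 + 1) else d := by
  induction d using pvNormDown.induct with
  | case1 d h ih =>
    rw [pvNormDown, if_pos h, ih, if_pos h]
    split_ifs with h2 <;> omega
  | case2 d h =>
    rw [pvNormDown, if_neg h, if_neg h]

theorem pvChain_eq (e : Int) (h1 : -7 ≤ e) (h2 : e ≤ 7) :
    (if e = 0 then "unison"
     else if e = 1 then "step_up"
     else if e = -1 then "step_down"
     else if e = 2 then "third_up"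
     else if e = -2 then "third_down"
     else if e = 3 then "fourth_up"
     else if e = -3 then "fourth_down"
     else if e = 4 then "fifth_up"
     else if e = -4 then "fifth_down"
     else if e = 5 then "sixth_up"
     else if e = -5 then "sixth_down"
     else if e = 6 then "octave_up"
     else if e = -6 then "octave_down"
     else if e = 7 then "octave_up"
     else if e = -7 then "octave_down"
     else "unreachable") =
    (if e = 0 then "unison"
     else (PySem.List.pyGet? pvBases |e|).getD "" ++ if e > 0 then "_up" else "_down") := by
  interval_cases e <;> rfl

theorem compute_interval_spec : Claim_equal_compute_interval := by
  intro a b _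
  unfold Spec_compute_interval compute_interval compute_interval_alt
  simp only [pvNormUp_eq, pvNormDown_eq,
    PySem.Int.mod_eq_emod_of_pos (show (0:Int) < 7 by norm_num)]
  set d0 : Int := b - a with hd0
  have h1 : (if (if d0 > 7 then (d0 - 1) % 7 + 1 else d0) < -7
      then -((-(if d0 > 7 then (d0 - 1) % 7 + 1 else d0) - 1) % 7 + 1)
      else (if d0 > 7 then (d0 - 1) % 7 + 1 else d0)) =
      (if d0 > 7 then (d0 - 1) % 7 + 1 else if d0 < -7 then -((-d0 - 1) % 7 + 1) else d0) := by
    split_ifs <;> omega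
  rw [h1]
  have hb1 : -7 ≤ (if d0 > 7 then (d0 - 1) % 7 + 1 else if d0 < -7 then -((-d0 - 1) % 7 + 1) else d0) := by
    split_ifs <;> omega
  have hb2 : (if d0 > 7 then (d0 - 1) % 7 + 1 else if d0 < -7 then -((-d0 - 1) % 7 + 1) else d0) ≤ 7 := by
    split_ifs <;> omega
  exact pvChain_eq _ hb1 hb2
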